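-- pv_equiv track=rewrite | github.com/sheacon/used_car_pricing | process_listings.py | split_file_lines
-- ===== SOURCE A (Python) =====
-- def split_file_lines(num_lines, num_pieces):
--     indexes_per_piece = num_lines // num_pieces
--     remaining_indexes = num_lines % num_pieces
--     ranges = []
--     current_index = 0
--     for i in range(num_pieces):
--         if i < remaining_indexes:
--             range_end = current_index + indexes_per_piece + 1
--         else:
--             range_end = current_index + indexes_per_piece
--         ranges.append((current_index, range_end))
--         current_index = range_end
--     return ranges
-- ===== SOURCE B (Python) =====
-- def split_file_lines(num_lines, num_pieces):
--     q, r = divmod(num_lines, num_pieces)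
--     def b(i):
--         return i * q + min(i, r)
--     return [(b(i), b(i + 1)) for i in range(num_pieces)]
-- ===== Notes on version B (the rewrite author's own statement) =====
-- stated objective: simpler
-- what changed: Replaces the running current_index accumulator and the i<remainder branch by the closed-form boundary b(i)=i*q+min(i,r), emitting each (b(i),b(i+1)) directly from i.
import Mathlib
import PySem

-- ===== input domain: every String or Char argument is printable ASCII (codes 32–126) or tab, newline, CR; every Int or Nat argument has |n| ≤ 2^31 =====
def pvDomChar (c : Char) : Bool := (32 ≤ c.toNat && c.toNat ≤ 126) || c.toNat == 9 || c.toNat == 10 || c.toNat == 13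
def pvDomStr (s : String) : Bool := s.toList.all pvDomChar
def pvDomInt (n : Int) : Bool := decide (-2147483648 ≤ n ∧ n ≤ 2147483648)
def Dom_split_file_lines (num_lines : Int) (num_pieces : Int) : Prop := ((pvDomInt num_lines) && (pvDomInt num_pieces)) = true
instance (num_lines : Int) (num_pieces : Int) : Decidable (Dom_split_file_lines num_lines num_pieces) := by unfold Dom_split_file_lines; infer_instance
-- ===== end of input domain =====

-- B replaces A's running current_index accumulator and conditional +1 by the
-- closed-form boundary b(i) = i*q + min(i, r); objective: simpler.

-- ===== PORT A =====
def split_file_lines (num_lines : Int) (num_pieces : Int) : List (Int × Int) :=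
  let indexes_per_piece := PySem.Int.floordiv num_lines num_pieces
  let remaining_indexes := PySem.Int.mod num_lines num_pieces
  let st :=
    (PySem.List.pyRange 0 num_pieces 1).foldl
      (fun (st : List (Int × Int) × Int) i =>
        let range_end :=
          if i < remaining_indexes then st.2 + indexes_per_piece + 1
          else st.2 + indexes_per_piece
        (st.1 ++ [(st.2, range_end)], range_end))
      ([], 0)
  st.1

-- ===== PORT B =====
def split_file_lines_alt (num_lines : Int) (num_pieces : Int) : List (Int × Int) :=
  let q := PySem.Int.floordiv num_lines num_pieces
  let r := PySem.Int.mod num_lines num_pieces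
  (PySem.List.pyRange 0 num_pieces 1).map
    (fun i => (i * q + min i r, (i + 1) * q + min (i + 1) r))

-- ===== PRECONDITION & SPEC =====
-- A raises ZeroDivisionError iff num_pieces = 0; no other input is excluded.
def Pre_split_file_lines (num_lines : Int) (num_pieces : Int) : Prop := num_pieces ≠ 0
instance (num_lines : Int) (num_pieces : Int) : Decidable (Pre_split_file_lines num_lines num_pieces) := by unfold Pre_split_file_lines; infer_instance
def pvWitness_split_file_lines : Int × Int := (10, 3)

def Spec_split_file_lines (num_lines : Int) (num_pieces : Int) (out : List (Int × Int)) : Prop := out = split_file_lines_alt num_lines num_pieces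
instance (num_lines : Int) (num_pieces : Int) (out : List (Int × Int)) : Decidable (Spec_split_file_lines num_lines num_pieces out) := by unfold Spec_split_file_lines; infer_instance

-- ===== CLAIM (what is proved, stated in full; the proofs are below) =====
def Claim_equal_split_file_lines : Prop := ∀ (num_lines : Int) (num_pieces : Int), Dom_split_file_lines num_lines num_pieces → Pre_split_file_lines num_lines num_pieces → Spec_split_file_lines num_lines num_pieces (split_file_lines num_lines num_pieces)

-- ===== LEMMAS AND PROOFS =====

-- Loop invariant: folding A's body over range(a, a+n) starting from
-- accumulator acc and current_index = b(a) yields acc ++ the closed-form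
-- tuples for that range, and current_index = b(a+n).
theorem pv_fold_key (q r : Int) :
    ∀ (n : Nat) (a : Int) (acc : List (Int × Int)), 0 ≤ a →
      (PySem.List.pyRange a (a + n) 1).foldl
        (fun (st : List (Int × Int) × Int) i =>
          let range_end := if i < r then st.2 + q + 1 else st.2 + q
          (st.1 ++ [(st.2, range_end)], range_end))
        (acc, a * q + min a r)
      = (acc ++ (PySem.List.pyRange a (a + n) 1).map
            (fun i => (i * q + min i r, (i + 1) * q + min (i + 1) r)),
         (a + n) * q + min (a + n) r) := by
  intro n
  induction n with
  | zero =>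
    intro a acc _
    simp
  | succ n ih =>
    intro a acc ha
    rw [PySem.List.pyRange_one_cons (by push_cast; omega : a < a + ((n+1 : Nat) : Int))]
    simp only [List.foldl_cons, List.map_cons]
    have hend : (if a < r then a * q + min a r + q + 1 else a * q + min a r + q)
        = (a + 1) * q + min (a + 1) r := by
      split_ifs with h
      · have : min a r = a := by omega
        have : min (a + 1) r = a + 1 := by omega
        simp_all; ring
      · have : min a r = r := by omega
        have : min (a + 1) r = r := by omega
        simp_all; ring
    simp only [hend]
    have harg : a + ((n + 1 : Nat) : Int) = (a + 1) + (n : Nat) := by push_cast; ring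
    rw [harg]
    rw [ih (a + 1) (acc ++ [(a * q + min a r, (a + 1) * q + min (a + 1) r)]) (by omega)]
    simp

-- ===== VERDICT (by name: the statement is the Claim_ definition above) =====
theorem split_file_lines_spec : Claim_equal_split_file_lines := by
  intro num_lines num_pieces _ hpre
  unfold Spec_split_file_lines split_file_lines split_file_lines_alt
  by_cases hp : 0 < num_pieces
  · have hr : 0 ≤ PySem.Int.mod num_lines num_pieces := by
      rw [PySem.Int.mod_eq_emod_of_pos hp]; exact Int.emod_nonneg _ (by omega)
    have key := pv_fold_key (PySem.Int.floordiv num_lines num_pieces)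
      (PySem.Int.mod num_lines num_pieces) num_pieces.toNat 0 [] le_rfl
    rw [show (0:Int) + ((num_pieces.toNat : Nat) : Int) = num_pieces by omega] at key
    rw [zero_mul, zero_add, min_eq_left hr]  at key
    simp only [List.nil_append] at key
    simp [key]
  · have h0 : num_pieces ≤ 0 := by omega
    rw [PySem.List.pyRange_one_eq_nil h0]
    simp
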